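-- pv_equiv track=rewrite | github.com/vadimgrin/vadimgrin | llinkedlist2.py | num2list
-- ===== SOURCE A (Python) =====
-- def num2list(num: int):
--     ret = []
--     m = 10
--     while num > 0:
--         r = num % m
--         ret.append(r)
--         num = num - r
--         m *= 10
--     return ret
-- ===== SOURCE B (Python) =====
-- def num2list(num: int):
--     def go(n, p):
--         if n <= 0:
--             return []
--         q, r = divmod(n, 10)
--         return [r * p] + go(q, p * 10)
--     return go(num, 1)
-- ===== Notes on version B (the rewrite author's own statement) =====
-- stated objective: alternative
-- what changed: replaces the while-loop that keeps the full number and peels place values with a growing modulus and subtraction by a structural recursion that divmods by a constant 10 while carrying a place multiplier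
import Mathlib
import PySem

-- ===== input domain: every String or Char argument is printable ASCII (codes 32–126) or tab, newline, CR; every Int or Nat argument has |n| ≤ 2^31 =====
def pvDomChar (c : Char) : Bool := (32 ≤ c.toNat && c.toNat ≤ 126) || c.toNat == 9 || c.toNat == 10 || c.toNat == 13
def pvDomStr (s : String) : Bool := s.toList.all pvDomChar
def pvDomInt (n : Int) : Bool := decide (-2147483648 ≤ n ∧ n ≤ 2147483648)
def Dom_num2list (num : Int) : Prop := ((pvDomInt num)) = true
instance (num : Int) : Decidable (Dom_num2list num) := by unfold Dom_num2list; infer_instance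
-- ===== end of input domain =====

-- B replaces A's while-loop (growing modulus m, subtracting each remainder from num) by a
-- structural recursion dividing by a constant 10 and carrying a place multiplier; same values.

-- ===== PORT A =====
-- A's while-loop, with a fuel bound that is always sufficient (the loop runs at most
-- num + O(log num) iterations: each iteration either decreases num or multiplies m by 10).
def num2listLoop : Nat → Int → Int → List Int → List Int
  | 0, _, _, ret => ret
  | f + 1, num, m, ret =>
    if num > 0 then
      let r := PySem.Int.mod num m
      num2listLoop f (num - r) (m * 10) (ret ++ [r])
    else ret

def num2list (num : Int) : List Int := num2listLoop (2 * num.toNat + 4) num 10 []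

-- ===== PORT B =====
def num2listGo (n p : Int) : List Int :=
  if n ≤ 0 then []
  else (PySem.Int.mod n 10 * p) :: num2listGo (PySem.Int.floordiv n 10) (p * 10)
termination_by n.toNat
decreasing_by
  rw [PySem.Int.floordiv_eq_ediv_of_pos (by omega : (0:Int) < 10)]
  omega

def num2list_alt (num : Int) : List Int := num2listGo num 1

-- ===== PRECONDITION & SPEC =====
def Spec_num2list (num : Int) (out : List Int) : Prop := out = num2list_alt num
instance (num : Int) (out : List Int) : Decidable (Spec_num2list num out) := by unfold Spec_num2list; infer_instance

-- ===== CLAIM (what is proved, stated in full; the proofs are below) =====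
def Claim_equal_num2list : Prop := ∀ (num : Int), Dom_num2list num → Spec_num2list num (num2list num)

-- ===== LEMMAS AND PROOFS =====

lemma num2listLoop_nonpos (f : Nat) (num m : Int) (ret : List Int) (h : num ≤ 0) :
    num2listLoop f num m ret = ret := by
  cases f with
  | zero => rfl
  | succ f => simp [num2listLoop, show ¬ num > 0 by omega]

lemma num2listGo_nonpos (n p : Int) (h : n ≤ 0) : num2listGo n p = [] := by
  rw [num2listGo]; simp [h]

-- main invariant: the loop on (d*n, 10*d) produces exactly B's recursion on (n, d)
lemma loop_eq_go : ∀ (f : Nat) (n d : Int) (ret : List Int), 0 < d → 0 ≤ n → n.toNat < f →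
    num2listLoop f (d * n) (10 * d) ret = ret ++ num2listGo n d := by
  intro f
  induction f with
  | zero => intro n d ret _ _ h; omega
  | succ f ih =>
    intro n d ret hd hn hf
    rcases eq_or_lt_of_le hn with h0 | hpos
    · subst h0
      rw [num2listLoop_nonpos _ _ _ _ (by simp), num2listGo_nonpos 0 d (by omega),
        List.append_nil]
    · have hnum : d * n > 0 := by positivity
      have hmod : PySem.Int.mod (d * n) (10 * d) = d * (n % 10) := by
        rw [PySem.Int.mod_eq_emod_of_pos (by positivity), mul_comm 10 d,
          Int.mul_emod_mul_of_pos _ _ hd]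
      have hmod10 : PySem.Int.mod n 10 = n % 10 :=
        PySem.Int.mod_eq_emod_of_pos (by omega)
      have hdiv10 : PySem.Int.floordiv n 10 = n / 10 :=
        PySem.Int.floordiv_eq_ediv_of_pos (by omega)
      have hsub : d * n - d * (n % 10) = (10 * d) * (n / 10) := by
        nlinarith [Int.emod_add_mul_ediv n 10]
      have hgo : num2listGo n d = (n % 10 * d) :: num2listGo (n / 10) (d * 10) := by
        rw [num2listGo, if_neg (by omega), hmod10, hdiv10]
      rw [show num2listLoop (f + 1) (d * n) (10 * d) ret =
            if d * n > 0 then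
              num2listLoop f (d * n - PySem.Int.mod (d * n) (10 * d)) ((10 * d) * 10)
                (ret ++ [PySem.Int.mod (d * n) (10 * d)]) else ret from rfl,
        if_pos hnum, hmod, hsub]
      rw [show (10 * d) * 10 = 10 * (10 * d) by ring]
      rw [ih (n / 10) (10 * d) _ (by positivity) (Int.ediv_nonneg (by omega) (by omega))
        (by omega)]
      rw [hgo, show d * 10 = 10 * d by ring, show n % 10 * d = d * (n % 10) by ring]
      simp

-- ===== VERDICT (by name: the statement is the Claim_ definition above) =====
theorem num2list_spec : Claim_equal_num2list := by
  intro num _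
  unfold Spec_num2list num2list num2list_alt
  by_cases h : num ≤ 0
  · rw [num2listLoop_nonpos _ _ _ _ h, num2listGo_nonpos _ _ h]
  · have := loop_eq_go (2 * num.toNat + 4) num 1 [] (by omega) (by omega) (by omega)
    simpa using this
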